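-- pv_equiv track=rewrite | github.com/neznajko/book | book.py | next_partition
-- ===== SOURCE A (Python) =====
-- def next_partition(p, s): #;;;;;;;;;;;;;;;;;;;;;;;;;;;;;;;;;;;;;;;;;;;;#
--     """ p - partition
--         s - number of subgroups """
--     dest = 0 #                                                         #
--     for i in range(s - 1): #                                           #
--         for j in range(i + 1, s): #                                    #
--             if p[i] - p[j] > 1: #                                      #
--                 orig = i #                                             #
--                 dest = j #                                             #
--                 break #                                                #
--     if dest: #                                                         #
--         p[orig] -= 1 #                                                 #
--         p[dest] += 1 #                                                 #
--         return True #                                                  #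
--     return False #;;;;;;;;;;;;;;;;;;;;;;;;;;;;;;;;;;;;;;;;;;;;;;;;;;;;;#
-- ===== SOURCE B (Python) =====
-- def next_partition(p, s):
--     """ p - partition
--         s - number of subgroups """
--     if s <= 1:
--         return False
--     m = p[s - 1]  # running minimum of p[i+1 .. s-1]
--     for i in range(s - 2, -1, -1):
--         if m < p[i] - 1:
--             j = next(k for k in range(i + 1, s) if p[k] < p[i] - 1)
--             p[i] -= 1
--             p[j] += 1
--             return True
--         if p[i] < m:
--             m = p[i]
--     return False
-- ===== Notes on version B (the rewrite author's own statement) =====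
-- stated objective: faster
-- what changed: Replaces A's nested full double scan over all (i,j) pairs by a single right-to-left pass that maintains a running suffix minimum, stopping at the first (= largest) qualifying i and then locating the first qualifying j directly.
import Mathlib
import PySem

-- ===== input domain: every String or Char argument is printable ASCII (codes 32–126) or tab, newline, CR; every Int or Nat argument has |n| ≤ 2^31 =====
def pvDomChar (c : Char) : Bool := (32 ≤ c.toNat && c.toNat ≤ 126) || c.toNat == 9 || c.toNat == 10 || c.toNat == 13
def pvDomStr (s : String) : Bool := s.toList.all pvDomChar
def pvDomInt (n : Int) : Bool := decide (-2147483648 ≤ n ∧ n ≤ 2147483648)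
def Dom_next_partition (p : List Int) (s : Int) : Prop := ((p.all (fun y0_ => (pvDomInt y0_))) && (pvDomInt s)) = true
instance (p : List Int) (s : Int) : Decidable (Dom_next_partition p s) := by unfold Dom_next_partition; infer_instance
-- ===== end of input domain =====

-- B replaces A's quadratic double scan by a single right-to-left pass with a running suffix
-- minimum (faster); both Pythons mutate p the same way, the equivalence proved here is about
-- the RETURN value only.

-- ===== PORT A =====
-- inner 'for j in range(i+1, s): if p[i] - p[j] > 1: … break' — first qualifying j, if any
def pvInnerA (p : List Int) (i : Int) : List Int → Option Int
  | [] => none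
  | j :: rest =>
    if PySem.List.pyGetD p i 0 - PySem.List.pyGetD p j 0 > 1 then some j
    else pvInnerA p i rest

def next_partition (p : List Int) (s : Int) : Bool :=
  -- state (orig, dest), initially dest = 0 (orig starts unbound; 0 is never read before a write)
  let r := (PySem.List.pyRange 0 (s - 1) 1).foldl
    (fun (st : Int × Int) i =>
      match pvInnerA p i (PySem.List.pyRange (i + 1) s 1) with
      | some j => (i, j)
      | none => st) (0, 0)
  decide (r.2 ≠ 0)

-- ===== PORT B =====
-- right-to-left scan; m is the running minimum of p[i+1..s-1].  Source B's inner 'next(…)' scan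
-- only locates j for the in-place mutation and never affects the returned Bool, so this
-- return-value port stops at True.
def pvLoopB (p : List Int) : Int → List Int → Bool
  | _, [] => false
  | m, i :: rest =>
    if m < PySem.List.pyGetD p i 0 - 1 then true
    else pvLoopB p (if PySem.List.pyGetD p i 0 < m then PySem.List.pyGetD p i 0 else m) rest

def next_partition_alt (p : List Int) (s : Int) : Bool :=
  if s ≤ 1 then false
  else pvLoopB p (PySem.List.pyGetD p (s - 1) 0) (PySem.List.pyRange (s - 2) (-1) (-1))

-- ===== PRECONDITION & SPEC =====
-- Python A raises IndexError exactly when 2 ≤ s and p.length < s (some p[i]/p[j] is read out of range).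
def Pre_next_partition (p : List Int) (s : Int) : Prop := s ≤ (p.length : Int) ∨ s ≤ 1
instance (p : List Int) (s : Int) : Decidable (Pre_next_partition p s) := by
  unfold Pre_next_partition; infer_instance

def pvWitness_next_partition : List Int × Int := ([3, 1], 2)

def Spec_next_partition (p : List Int) (s : Int) (out : Bool) : Prop := out = next_partition_alt p s
instance (p : List Int) (s : Int) (out : Bool) : Decidable (Spec_next_partition p s out) := by
  unfold Spec_next_partition; infer_instance

-- ===== CLAIM (what is proved, stated in full; the proofs are below) =====
def Claim_equal_next_partition : Prop := ∀ (p : List Int) (s : Int), Dom_next_partition p s → Pre_next_partition p s → Spec_next_partition p s (next_partition p s)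

-- ===== LEMMAS AND PROOFS =====

lemma pvInnerA_isSome (p : List Int) (i : Int) (js : List Int) :
    (pvInnerA p i js).isSome = true ↔
      ∃ j, j ∈ js ∧ PySem.List.pyGetD p i 0 - PySem.List.pyGetD p j 0 > 1 := by
  induction js with
  | nil => simp [pvInnerA]
  | cons j rest ih =>
    simp only [pvInnerA]
    split_ifs with h
    · simp [h]
    · simp only [Option.isSome] at ih ⊢
      constructor
      · intro hs
        obtain ⟨j', hj', hgt⟩ := ih.mp hs
        exact ⟨j', List.mem_cons_of_mem _ hj', hgt⟩
      · rintro ⟨j', hj', hgt⟩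
        rcases List.mem_cons.mp hj' with rfl | hm
        · exact absurd hgt h
        · exact ih.mpr ⟨j', hm, hgt⟩

lemma pvInnerA_some_mem (p : List Int) (i j : Int) (js : List Int)
    (h : pvInnerA p i js = some j) : j ∈ js := by
  induction js with
  | nil => simp [pvInnerA] at h
  | cons j' rest ih =>
    simp only [pvInnerA] at h
    split_ifs at h with hc
    · cases h; exact List.mem_cons_self ..
    · exact List.mem_cons_of_mem _ (ih h)

lemma pvFoldA (p : List Int) (s : Int) (is : List Int) (st : Int × Int)
    (hnn : ∀ i ∈ is, 0 ≤ i) :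
    ((is.foldl (fun (st : Int × Int) i =>
        match pvInnerA p i (PySem.List.pyRange (i + 1) s 1) with
        | some j => (i, j)
        | none => st) st).2 ≠ 0 ↔
      st.2 ≠ 0 ∨ ∃ i, i ∈ is ∧ (pvInnerA p i (PySem.List.pyRange (i + 1) s 1)).isSome = true) := by
  induction is generalizing st with
  | nil => simp
  | cons i rest ih =>
    have hi : 0 ≤ i := hnn i (List.mem_cons_self ..)
    have hrest : ∀ i' ∈ rest, 0 ≤ i' := fun i' h => hnn i' (List.mem_cons_of_mem _ h)
    simp only [List.foldl_cons]
    cases hin : pvInnerA p i (PySem.List.pyRange (i + 1) s 1) with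
    | some j =>
      have hj : 0 < j := by
        have := PySem.List.mem_pyRange_one.mp (pvInnerA_some_mem p i j _ hin)
        omega
      rw [ih _ hrest]
      constructor
      · intro _; exact Or.inr ⟨i, List.mem_cons_self .., by rw [hin]; rfl⟩
      · intro _; exact Or.inl (by simp; omega)
    | none =>
      rw [ih _ hrest]
      constructor
      · rintro (h | ⟨i', hm, hs⟩)
        · exact Or.inl h
        · exact Or.inr ⟨i', List.mem_cons_of_mem _ hm, hs⟩
      · rintro (h | ⟨i', hm, hs⟩)
        · exact Or.inl h
        · rcases List.mem_cons.mp hm with rfl | hm'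
          · rw [hin] at hs; simp at hs
          · exact Or.inr ⟨i', hm', hs⟩

-- A returns True iff some pair (i, j), i < j < s, i < s-1, has p[j] < p[i] - 1
lemma next_partition_char (p : List Int) (s : Int) :
    next_partition p s = true ↔
      ∃ i, 0 ≤ i ∧ i < s - 1 ∧ ∃ j, i < j ∧ j < s ∧
        PySem.List.pyGetD p j 0 < PySem.List.pyGetD p i 0 - 1 := by
  unfold next_partition
  rw [decide_eq_true_iff]
  rw [pvFoldA p s _ _ (fun i h => (PySem.List.mem_pyRange_one.mp h).1)]
  simp only [ne_eq, not_true_eq_false, false_or]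
  constructor
  · rintro ⟨i, hm, hs⟩
    obtain ⟨hi0, hi1⟩ := PySem.List.mem_pyRange_one.mp hm
    obtain ⟨j, hjm, hgt⟩ := (pvInnerA_isSome p i _).mp hs
    obtain ⟨hj1, hj2⟩ := PySem.List.mem_pyRange_one.mp hjm
    exact ⟨i, hi0, hi1, j, by omega, hj2, by omega⟩
  · rintro ⟨i, hi0, hi1, j, hj1, hj2, hlt⟩
    refine ⟨i, PySem.List.mem_pyRange_one.mpr ⟨hi0, hi1⟩, (pvInnerA_isSome p i _).mpr
      ⟨j, PySem.List.mem_pyRange_one.mpr ⟨by omega, hj2⟩, by omega⟩⟩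

-- the countdown loop of B: if m is exactly the minimum profile of p over (t, s)
-- (in the sense of the hypothesis hm), the loop decides the same pair-existence predicate
lemma pvLoopB_char (p : List Int) (s : Int) :
    ∀ (n : ℕ) (t m : Int), t + 1 = (n : Int) →
      (∀ c, m < c ↔ ∃ j, t < j ∧ j < s ∧ PySem.List.pyGetD p j 0 < c) →
      (pvLoopB p m (PySem.List.pyRange t (-1) (-1)) = true ↔
        ∃ i, 0 ≤ i ∧ i ≤ t ∧ ∃ j, i < j ∧ j < s ∧
          PySem.List.pyGetD p j 0 < PySem.List.pyGetD p i 0 - 1) := by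
  intro n
  induction n with
  | zero =>
    intro t m ht _
    rw [PySem.List.pyRange_neg_one_eq_nil (by omega)]
    simp only [pvLoopB]
    constructor
    · intro h; cases h
    · rintro ⟨i, h0, h1, _⟩; omega
  | succ k ih =>
    intro t m ht hm
    have ht0 : (0 : Int) ≤ t := by omega
    rw [PySem.List.pyRange_neg_one_cons (by omega : (-1 : Int) < t)]
    simp only [pvLoopB]
    by_cases hif : m < PySem.List.pyGetD p t 0 - 1
    · rw [if_pos hif]
      simp only [true_iff]
      obtain ⟨j, hj1, hj2, hj3⟩ := (hm _).mp hif
      exact ⟨t, ht0, le_refl t, j, hj1, hj2, hj3⟩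
    · rw [if_neg hif]
      have hm' : ∀ c, (if PySem.List.pyGetD p t 0 < m then PySem.List.pyGetD p t 0 else m) < c ↔
          ∃ j, t - 1 < j ∧ j < s ∧ PySem.List.pyGetD p j 0 < c := by
        intro c
        by_cases hmin : PySem.List.pyGetD p t 0 < m
        · rw [if_pos hmin]
          constructor
          · intro h
            by_cases hts : t < s
            · exact ⟨t, by omega, hts, h⟩
            · obtain ⟨j, hj1, hj2, _⟩ := (hm (m + 1)).mp (by omega)
              omega
          · rintro ⟨j, hj1, hj2, hj3⟩
            by_cases hjt : j = t
            · subst hjt; exact hj3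
            · have : m < c := (hm c).mpr ⟨j, by omega, hj2, hj3⟩
              omega
        · rw [if_neg hmin]
          constructor
          · intro h
            obtain ⟨j, hj1, hj2, hj3⟩ := (hm c).mp h
            exact ⟨j, by omega, hj2, hj3⟩
          · rintro ⟨j, hj1, hj2, hj3⟩
            by_cases hjt : j = t
            · subst hjt; omega
            · exact (hm c).mpr ⟨j, by omega, hj2, hj3⟩
      rw [ih (t - 1) _ (by omega) hm']
      constructor
      · rintro ⟨i, h0, h1, j, hj⟩
        exact ⟨i, h0, by omega, j, hj⟩
      · rintro ⟨i, h0, h1, j, hj1, hj2, hj3⟩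
        by_cases hit : i = t
        · subst hit
          exact absurd ((hm _).mpr ⟨j, hj1, hj2, hj3⟩) hif
        · exact ⟨i, h0, by omega, j, hj1, hj2, hj3⟩

lemma ports_agree (p : List Int) (s : Int) :
    next_partition p s = next_partition_alt p s := by
  rw [Bool.eq_iff_iff, next_partition_char]
  unfold next_partition_alt
  split_ifs with hs
  · simp only [iff_false]
    rintro ⟨i, h0, h1, _⟩; omega
  · rw [pvLoopB_char p s (s - 1).toNat (s - 2) _ (by omega)
      (by
        intro c
        constructor
        · intro h; exact ⟨s - 1, by omega, by omega, h⟩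
        · rintro ⟨j, hj1, hj2, hj3⟩
          have : j = s - 1 := by omega
          subst this; exact hj3)]
    constructor
    · rintro ⟨i, h0, h1, j, hj⟩; exact ⟨i, h0, by omega, j, hj⟩
    · rintro ⟨i, h0, h1, j, hj⟩; exact ⟨i, h0, by omega, j, hj⟩

-- ===== VERDICT (by name: the statement is the Claim_ definition above) =====
theorem next_partition_spec : Claim_equal_next_partition := by
  intro p s _ _
  unfold Spec_next_partition
  exact ports_agree p s
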